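-- pv_equiv track=rewrite | github.com/boring-km/coding-test-algorithm | string/programmers_defective_user.py | solution
-- ===== SOURCE A (Python) =====
-- def solution(user_id, banned_id):
--
--     record = []
--     users = dict()
--     for user in user_id:
--         users[user] = len(user)
--
--     for ban in banned_id:
--         size = len(ban)
--         index_list = []
--         check = []
--         for s in range(size):
--             if ban[s] != '*':
--                 index_list.append([s, ban[s]])
--
--         for key in users.keys():
--             target = users[key]
--             count = 0
--             if target == size:
--                 for index in index_list:
--                     if key[index[0]] == index[1]:
--                         count += 1
--                 if count == len(index_list):
--                     check.append(key)
--
--         record.append(check)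
--
--     def recursive(target_list, i, record_set, result_set):
--         if i == len(target_list):
--             result_set.add(''.join(sorted(record_set)))
--         else:
--             for item in target_list[i]:  # i번째 banned_id에 들어갈 후보들
--                 temp = set(record_set)
--                 temp.add(item)
--                 if len(temp) == len(record_set)+1:    # 추가됨
--                     recursive(target_list, i + 1, temp, result_set)
--         return result_set
--
--     result = recursive(record, 0, set(), set())
--
--     return len(result)
-- ===== SOURCE B (Python) =====
-- def solution(user_id, banned_id):
--     def matches(ban, u):
--         return len(u) == len(ban) and all(b == '*' or b == c for b, c in zip(ban, u))
--
--     users = list(dict.fromkeys(user_id))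
--     record = [[u for u in users if matches(ban, u)] for ban in banned_id]
--
--     combos = [[]]
--     for cand in record:
--         combos = [c + [x] for c in combos for x in cand]
--
--     result = set()
--     for c in combos:
--         if len(set(c)) == len(c):
--             result.add(''.join(sorted(c)))
--     return len(result)
-- ===== Notes on version B (the rewrite author's own statement) =====
-- stated objective: alternative
-- what changed: Replaces A's recursive backtracking with an incrementally grown set (and its dict-of-lengths plus positional index_list matching) by a zip-based wildcard match, an explicit cartesian product of the per-pattern candidate lists, a filter keeping only all-distinct tuples, and counting the distinct sorted-join keys.
import Mathlib
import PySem

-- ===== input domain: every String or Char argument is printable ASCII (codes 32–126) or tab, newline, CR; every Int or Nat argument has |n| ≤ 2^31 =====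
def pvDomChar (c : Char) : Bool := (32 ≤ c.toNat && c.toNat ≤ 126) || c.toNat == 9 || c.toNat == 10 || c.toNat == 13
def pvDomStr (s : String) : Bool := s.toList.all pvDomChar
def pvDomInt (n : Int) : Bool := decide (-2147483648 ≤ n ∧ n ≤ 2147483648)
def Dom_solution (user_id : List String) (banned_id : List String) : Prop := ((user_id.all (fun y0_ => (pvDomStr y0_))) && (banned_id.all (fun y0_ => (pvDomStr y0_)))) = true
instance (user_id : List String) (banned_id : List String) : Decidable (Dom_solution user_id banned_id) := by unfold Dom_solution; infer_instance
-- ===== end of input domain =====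

-- B replaces A's recursive backtracking over per-pattern candidate lists by an explicit cartesian
-- product filtered for all-distinct tuples (objective: alternative decomposition, same exact count).

-- ===== PORT A =====
-- A's inner helper `recursive(target_list, i, record_set, result_set)`: structural recursion on the
-- remaining candidate lists, with the `for item in target_list[i]` loop as the mutual `solutionLoop`.
mutual
def solutionRec : List (List String) → PySem.Set String → PySem.Set String → PySem.Set String
  | [], record_set, result_set =>
      PySem.Set.add result_set (PySem.Str.join "" (PySem.List.sorted record_set (fun x => x)))
  | check :: rest, record_set, result_set => solutionLoop check rest record_set result_set
  termination_by tl _ _ => (tl.length, 0)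

def solutionLoop : List String → List (List String) → PySem.Set String → PySem.Set String → PySem.Set String
  | [], _, _, result_set => result_set
  | item :: more, rest, record_set, result_set =>
      let temp := PySem.Set.add record_set item
      let result' := if PySem.Set.len temp == PySem.Set.len record_set + 1
        then solutionRec rest temp result_set else result_set
      solutionLoop more rest record_set result'
  termination_by items rest _ _ => (rest.length, items.length + 1)
end

def solution (user_id : List String) (banned_id : List String) : Int :=
  let users : PySem.Dict String Int :=
    user_id.foldl (fun users user => users.insert user (PySem.Str.len user)) PySem.Dict.empty
  let record : List (List String) :=
    banned_id.foldl (fun record ban =>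
      let size := PySem.Str.len ban
      let index_list : List (Int × Char) :=
        (PySem.List.pyRange 0 size).foldl (fun il s =>
          if PySem.List.pyGetD ban.toList s ' ' != '*'
            then il ++ [(s, PySem.List.pyGetD ban.toList s ' ')] else il) []
      let check : List String :=
        users.keys.foldl (fun check key =>
          let target := users.getD key 0
          if target == size then
            let count : Int := index_list.foldl (fun count index =>
              if PySem.List.pyGetD key.toList index.1 ' ' == index.2 then count + 1 else count) 0
            if count == (index_list.length : Int) then check ++ [key] else check
          else check) []
      record ++ [check]) []
  PySem.Set.len (solutionRec record PySem.Set.empty PySem.Set.empty)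

-- ===== PORT B =====
def solutionAltMatches (ban : String) (u : String) : Bool :=
  PySem.Str.len u == PySem.Str.len ban &&
    (List.zip ban.toList u.toList).all (fun bc => bc.1 == '*' || bc.1 == bc.2)

def solution_alt (user_id : List String) (banned_id : List String) : Int :=
  let users := PySem.List.dedup user_id
  let record := banned_id.map (fun ban => users.filter (fun u => solutionAltMatches ban u))
  let combos := record.foldl (fun cs cand => cs.flatMap (fun c => cand.map (fun x => c ++ [x]))) [[]]
  let result := combos.foldl (fun result c =>
      if PySem.Set.len (PySem.Set.ofList c) == (c.length : Int) then
        PySem.Set.add result (PySem.Str.join "" (PySem.List.sorted c (fun x => x)))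
      else result) PySem.Set.empty
  PySem.Set.len result

-- ===== PRECONDITION & SPEC =====
def Spec_solution (user_id : List String) (banned_id : List String) (out : Int) : Prop := out = solution_alt user_id banned_id
instance (user_id : List String) (banned_id : List String) (out : Int) : Decidable (Spec_solution user_id banned_id out) := by unfold Spec_solution; infer_instance

-- ===== CLAIM (what is proved, stated in full; the proofs are below) =====
def Claim_equal_solution : Prop := ∀ (user_id : List String) (banned_id : List String), Dom_solution user_id banned_id → Spec_solution user_id banned_id (solution user_id banned_id)

-- ===== LEMMAS AND PROOFS =====

-- The dedup key added to the result set for a completed selection: join of the sorted strings.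
def keyOf (l : List String) : String := PySem.Str.join "" (PySem.List.sorted l (fun x => x))

-- `Sel tl c`: c picks exactly one element from each candidate list of tl, in order.
def Sel : List (List String) → List String → Prop
  | [], c => c = []
  | cand :: rest, c => ∃ x cs, c = x :: cs ∧ x ∈ cand ∧ Sel rest cs

theorem lenCond_iff (rs : PySem.Set String) (item : String) :
    ((PySem.Set.len (PySem.Set.add rs item) == PySem.Set.len rs + 1) = true) ↔ item ∉ rs := by
  by_cases hm : item ∈ rs
  · rw [PySem.Set.add_of_mem hm]
    simp [PySem.Set.len, hm]
  · rw [PySem.Set.add_of_not_mem hm]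
    simp [PySem.Set.len, hm]

theorem recA_char (tl : List (List String)) : ∀ (rs res : PySem.Set String),
    rs.Nodup → res.Nodup →
    (solutionRec tl rs res).Nodup ∧
      (∀ x, x ∈ solutionRec tl rs res ↔
        x ∈ res ∨ ∃ c, Sel tl c ∧ (rs ++ c).Nodup ∧ x = keyOf (rs ++ c)) := by
  induction tl with
  | nil =>
      intro rs res hrs hres
      simp only [solutionRec]
      refine ⟨PySem.Set.nodup_add _ _ hres, fun x => ?_⟩
      rw [PySem.Set.mem_add]
      constructor
      · rintro (h | h)
        · exact Or.inl h
        · exact Or.inr ⟨[], rfl, by simpa using hrs, by simpa [keyOf] using h⟩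
      · rintro (h | ⟨c, hsel, hnd, hx⟩)
        · exact Or.inl h
        · obtain rfl : c = [] := hsel
          exact Or.inr (by simpa [keyOf] using hx)
  | cons check rest ih =>
      intro rs res hrs hres
      simp only [solutionRec]
      suffices h : ∀ (items : List String) (res : PySem.Set String), res.Nodup →
          (solutionLoop items rest rs res).Nodup ∧
          (∀ x, x ∈ solutionLoop items rest rs res ↔ x ∈ res ∨
            ∃ item ∈ items, ∃ cs, Sel rest cs ∧ (rs ++ item :: cs).Nodup ∧
              x = keyOf (rs ++ item :: cs)) by
        obtain ⟨h1, h2⟩ := h check res hres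
        refine ⟨h1, fun x => (h2 x).trans (or_congr_right ?_)⟩
        constructor
        · rintro ⟨item, hi, cs, hsel, hnd, hx⟩
          exact ⟨item :: cs, ⟨item, cs, rfl, hi, hsel⟩, hnd, hx⟩
        · rintro ⟨c, hselc, hnd, hx⟩
          obtain ⟨item, cs, rfl, hi, hsel⟩ :
              ∃ y ys, c = y :: ys ∧ y ∈ check ∧ Sel rest ys := hselc
          exact ⟨item, hi, cs, hsel, hnd, hx⟩
      intro items
      induction items with
      | nil =>
          intro res hres
          simp only [solutionLoop]
          exact ⟨hres, fun x => by simp⟩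
      | cons item more ihm =>
          intro res hres
          simp only [solutionLoop]
          by_cases hm : item ∈ rs
          · have hcond : (PySem.Set.len (PySem.Set.add rs item) == PySem.Set.len rs + 1) = false := by
              rw [Bool.eq_false_iff]
              intro hc
              exact ((lenCond_iff rs item).1 hc) hm
            rw [hcond]
            simp only [Bool.false_eq_true, if_false]
            obtain ⟨h1, h2⟩ := ihm res hres
            refine ⟨h1, fun x => (h2 x).trans (or_congr_right ?_)⟩
            constructor
            · rintro ⟨i, hi, cs, hsel, hnd, hx⟩
              exact ⟨i, List.mem_cons_of_mem _ hi, cs, hsel, hnd, hx⟩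
            · rintro ⟨i, hi, cs, hsel, hnd, hx⟩
              rcases List.mem_cons.1 hi with rfl | hi'
              · exfalso
                rw [List.nodup_append] at hnd
                exact hnd.2.2 i hm i List.mem_cons_self rfl
              · exact ⟨i, hi', cs, hsel, hnd, hx⟩
          · have hcond : (PySem.Set.len (PySem.Set.add rs item) == PySem.Set.len rs + 1) = true :=
              (lenCond_iff rs item).2 hm
            rw [hcond]
            simp only [if_true]
            have htemp : PySem.Set.add rs item = rs ++ [item] := PySem.Set.add_of_not_mem hm
            have hnd' : (rs ++ [item]).Nodup := by
              rw [List.nodup_append]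
              refine ⟨hrs, List.nodup_singleton _, fun a ha b hb => ?_⟩
              simp only [List.mem_singleton] at hb
              subst hb
              intro h
              exact hm (h ▸ ha)
            rw [htemp]
            obtain ⟨hrnd, hrmem⟩ := ih (rs ++ [item]) res hnd' hres
            obtain ⟨h1, h2⟩ := ihm _ hrnd
            refine ⟨h1, fun x => ?_⟩
            rw [h2 x]
            have hassoc : ∀ cs : List String, (rs ++ [item]) ++ cs = rs ++ item :: cs := by
              intro cs; simp
            constructor
            · rintro (hx | ⟨i, hi, cs, hsel, hnd, hx⟩)
              · rcases (hrmem x).1 hx with hx' | ⟨cs, hsel, hnd, hx'⟩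
                · exact Or.inl hx'
                · exact Or.inr ⟨item, List.mem_cons_self, cs, hsel,
                    by rwa [hassoc] at hnd, by rwa [hassoc] at hx'⟩
              · exact Or.inr ⟨i, List.mem_cons_of_mem _ hi, cs, hsel, hnd, hx⟩
            · rintro (hx | ⟨i, hi, cs, hsel, hnd, hx⟩)
              · exact Or.inl ((hrmem x).2 (Or.inl hx))
              · rcases List.mem_cons.1 hi with rfl | hi'
                · exact Or.inl ((hrmem x).2 (Or.inr ⟨cs, hsel,
                    by rwa [hassoc], by rwa [hassoc]⟩))
                · exact Or.inr ⟨i, hi', cs, hsel, hnd, hx⟩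

theorem mem_prod_foldl (tl : List (List String)) : ∀ (cs : List (List String)) (c : List String),
    c ∈ tl.foldl (fun cs cand => cs.flatMap (fun c => cand.map (fun x => c ++ [x]))) cs ↔
      ∃ c0 ∈ cs, ∃ c1, Sel tl c1 ∧ c = c0 ++ c1 := by
  induction tl with
  | nil => intro cs c; simp [Sel]
  | cons cand rest ih =>
      intro cs c
      simp only [List.foldl_cons]
      rw [ih]
      constructor
      · rintro ⟨c0', hc0', c1, hsel, rfl⟩
        rw [List.mem_flatMap] at hc0'
        obtain ⟨c0, hc0, hmap⟩ := hc0'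
        rw [List.mem_map] at hmap
        obtain ⟨x, hx, rfl⟩ := hmap
        exact ⟨c0, hc0, x :: c1, ⟨x, c1, rfl, hx, hsel⟩, by simp⟩
      · rintro ⟨c0, hc0, c1, hsel1, rfl⟩
        obtain ⟨x, cs', rfl, hx, hsel⟩ :
            ∃ y ys, c1 = y :: ys ∧ y ∈ cand ∧ Sel rest ys := hsel1
        refine ⟨c0 ++ [x], ?_, cs', hsel, by simp⟩
        rw [List.mem_flatMap]
        exact ⟨c0, hc0, List.mem_map.2 ⟨x, hx, rfl⟩⟩

theorem ofList_length_eq_iff (c : List String) :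
    ((PySem.Set.ofList c).length = c.length) ↔ c.Nodup := by
  induction c using List.reverseRecOn with
  | nil => simp [PySem.Set.ofList_eq_foldl]
  | append_singleton xs x ih =>
      rw [PySem.Set.ofList_append_singleton]
      by_cases hm : x ∈ xs
      · have hx : x ∈ PySem.Set.ofList xs := (PySem.Set.mem_ofList xs x).2 hm
        rw [PySem.Set.add_of_mem hx]
        have hle := PySem.Set.length_ofList_le xs
        simp only [List.length_append, List.length_singleton]
        constructor
        · intro h; omega
        · intro h
          exfalso
          rw [List.nodup_append] at h
          exact h.2.2 x hm x (List.mem_singleton.2 rfl) rfl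
      · have hx : x ∉ PySem.Set.ofList xs := fun h => hm ((PySem.Set.mem_ofList xs x).1 h)
        rw [PySem.Set.add_of_not_mem hx]
        simp only [List.length_append, List.length_singleton]
        rw [List.nodup_append]
        constructor
        · intro h
          refine ⟨ih.1 (by omega), List.nodup_singleton _, fun a ha b hb => ?_⟩
          simp only [List.mem_singleton] at hb
          subst hb
          intro h'
          exact hm (h' ▸ ha)
        · rintro ⟨h1, _, _⟩
          have := ih.2 h1
          omega

theorem nodupCond_iff (c : List String) :
    ((PySem.Set.len (PySem.Set.ofList c) == (c.length : Int)) = true) ↔ c.Nodup := by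
  simp [PySem.Set.len, ofList_length_eq_iff]

theorem resultB_char (combos : List (List String)) : ∀ (res : PySem.Set String), res.Nodup →
    (combos.foldl (fun result c =>
        if PySem.Set.len (PySem.Set.ofList c) == (c.length : Int) then
          PySem.Set.add result (PySem.Str.join "" (PySem.List.sorted c (fun x => x)))
        else result) res).Nodup ∧
      (∀ x, x ∈ combos.foldl (fun result c =>
        if PySem.Set.len (PySem.Set.ofList c) == (c.length : Int) then
          PySem.Set.add result (PySem.Str.join "" (PySem.List.sorted c (fun x => x)))
        else result) res ↔ x ∈ res ∨ ∃ c ∈ combos, c.Nodup ∧ x = keyOf c) := by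
  induction combos with
  | nil => exact fun res hres => ⟨hres, fun x => by simp⟩
  | cons c more ih =>
      intro res hres
      simp only [List.foldl_cons]
      by_cases hc : c.Nodup
      · have hcond : (PySem.Set.len (PySem.Set.ofList c) == (c.length : Int)) = true :=
          (nodupCond_iff c).2 hc
        rw [hcond]
        simp only [if_true]
        obtain ⟨h1, h2⟩ := ih _ (PySem.Set.nodup_add _ _ hres)
        refine ⟨h1, fun x => ?_⟩
        rw [h2 x, PySem.Set.mem_add]
        constructor
        · rintro ((hx | hx) | ⟨c', hc', hnd, hx⟩)
          · exact Or.inl hx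
          · exact Or.inr ⟨c, List.mem_cons_self, hc, by simpa [keyOf] using hx⟩
          · exact Or.inr ⟨c', List.mem_cons_of_mem _ hc', hnd, hx⟩
        · rintro (hx | ⟨c', hc', hnd, hx⟩)
          · exact Or.inl (Or.inl hx)
          · rcases List.mem_cons.1 hc' with rfl | hc''
            · exact Or.inl (Or.inr (by simpa [keyOf] using hx))
            · exact Or.inr ⟨c', hc'', hnd, hx⟩
      · have hcond : (PySem.Set.len (PySem.Set.ofList c) == (c.length : Int)) = false := by
          rw [Bool.eq_false_iff]
          intro h
          exact hc ((nodupCond_iff c).1 h)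
        rw [hcond]
        simp only [Bool.false_eq_true, if_false]
        obtain ⟨h1, h2⟩ := ih res hres
        refine ⟨h1, fun x => (h2 x).trans (or_congr_right ?_)⟩
        constructor
        · rintro ⟨c', hc', hnd, hx⟩
          exact ⟨c', List.mem_cons_of_mem _ hc', hnd, hx⟩
        · rintro ⟨c', hc', hnd, hx⟩
          rcases List.mem_cons.1 hc' with rfl | hc''
          · exact absurd hnd hc
          · exact ⟨c', hc'', hnd, hx⟩

theorem usersA_getD (user_id : List String) (d : PySem.Dict String Int) (k : String) :
    (user_id.foldl (fun users user => users.insert user (PySem.Str.len user)) d).getD k 0 =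
      if k ∈ user_id then PySem.Str.len k else d.getD k 0 := by
  induction user_id generalizing d with
  | nil => simp
  | cons u us ih =>
      simp only [List.foldl_cons, ih, PySem.Dict.getD_insert, List.mem_cons]
      by_cases h1 : k ∈ us <;> by_cases h2 : k = u <;> simp [h1, h2]

theorem usersA_keys (user_id : List String) :
    (user_id.foldl (fun users user => users.insert user (PySem.Str.len user))
      (PySem.Dict.empty : PySem.Dict String Int)).keys = PySem.Set.ofList user_id := by
  have h := PySem.Dict.keys_foldl_insert (κ := String) (ν := Int) user_id
    (fun _ u => PySem.Str.len u) PySem.Dict.empty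
  simpa [PySem.Set.update, PySem.Set.ofList_eq_foldl, PySem.Dict.keys_empty] using h

theorem check_pred_eq (ban key : String) (hlen : PySem.Str.len key = PySem.Str.len ban) :
    ((0 + (((PySem.List.pyRange 0 (PySem.Str.len ban)).foldl (fun il s =>
          if PySem.List.pyGetD ban.toList s ' ' != '*'
            then il ++ [(s, PySem.List.pyGetD ban.toList s ' ')] else il) []).countP
        (fun index => PySem.List.pyGetD key.toList index.1 ' ' == index.2) : Int) ==
      (((PySem.List.pyRange 0 (PySem.Str.len ban)).foldl (fun il s =>
          if PySem.List.pyGetD ban.toList s ' ' != '*'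
            then il ++ [(s, PySem.List.pyGetD ban.toList s ' ')] else il) []).length : Int)) = true) ↔
      ((List.zip ban.toList key.toList).all (fun bc => bc.1 == '*' || bc.1 == bc.2) = true) := by
  have hbk : ban.toList.length = key.toList.length := by
    rw [PySem.Str.len_eq, PySem.Str.len_eq] at hlen
    exact_mod_cast hlen.symm
  have hil : (PySem.List.pyRange 0 (PySem.Str.len ban)).foldl (fun il s =>
        if PySem.List.pyGetD ban.toList s ' ' != '*'
          then il ++ [(s, PySem.List.pyGetD ban.toList s ' ')] else il) [] =
      [] ++ ((PySem.List.pyRange 0 (PySem.Str.len ban)).filter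
          (fun s => PySem.List.pyGetD ban.toList s ' ' != '*')).map
        (fun s => (s, PySem.List.pyGetD ban.toList s ' ')) :=
    PySem.List.foldl_append_if _ _ _ _
  rw [hil]
  simp only [List.nil_append, zero_add, beq_iff_eq, Int.natCast_inj]
  rw [List.countP_eq_length, List.all_eq_true]
  constructor
  · intro h bc hbc
    obtain ⟨j, hj, rfl⟩ := List.mem_iff_getElem.1 hbc
    have hjb : j < ban.toList.length := by
      rw [List.length_zip] at hj
      omega
    have hjk : j < key.toList.length := by omega
    rw [List.getElem_zip]
    by_cases hstar : ban.toList[j] = '*'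
    · simp [hstar]
    · have hmem : ((j : Int), ban.toList[j]) ∈
          ((PySem.List.pyRange 0 (PySem.Str.len ban)).filter
            (fun s => PySem.List.pyGetD ban.toList s ' ' != '*')).map
          (fun s => (s, PySem.List.pyGetD ban.toList s ' ')) := by
        rw [List.mem_map]
        refine ⟨(j : Int), ?_, ?_⟩
        · rw [List.mem_filter]
          refine ⟨?_, ?_⟩
          · rw [PySem.List.mem_pyRange_one, PySem.Str.len_eq]
            constructor
            · exact_mod_cast Nat.zero_le j
            · exact_mod_cast hjb
          · rw [PySem.List.pyGetD_natCast, List.getD_eq_getElem _ _ hjb]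
            simpa using hstar
        · rw [PySem.List.pyGetD_natCast, List.getD_eq_getElem _ _ hjb]
      have hq := h _ hmem
      simp only [PySem.List.pyGetD_natCast] at hq
      rw [List.getD_eq_getElem _ _ hjk] at hq
      rw [beq_iff_eq] at hq
      simp [hq]
  · intro h idx hidx
    rw [List.mem_map] at hidx
    obtain ⟨s, hs, rfl⟩ := hidx
    rw [List.mem_filter] at hs
    obtain ⟨hsr, hsp⟩ := hs
    rw [PySem.List.mem_pyRange_one] at hsr
    obtain ⟨hs0, hsn⟩ := hsr
    obtain ⟨j, rfl⟩ : ∃ j : Nat, s = (j : Int) := ⟨s.toNat, (Int.toNat_of_nonneg hs0).symm⟩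
    rw [PySem.Str.len_eq] at hsn
    have hjb : j < ban.toList.length := by exact_mod_cast hsn
    have hjk : j < key.toList.length := by omega
    simp only [PySem.List.pyGetD_natCast] at hsp ⊢
    rw [List.getD_eq_getElem _ _ hjb] at hsp
    rw [List.getD_eq_getElem _ _ hjk, List.getD_eq_getElem _ _ hjb]
    have hzlen : j < (ban.toList.zip key.toList).length := by
      rw [List.length_zip]
      omega
    have hz := h _ (List.getElem_mem hzlen)
    rw [List.getElem_zip] at hz
    simp only [Bool.or_eq_true, beq_iff_eq] at hz
    rcases hz with h1 | h1
    · exact absurd h1 (by simpa using hsp)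
    · simp [h1]

theorem record_eq (user_id banned_id : List String) :
    banned_id.foldl (fun record ban =>
      let size := PySem.Str.len ban
      let index_list : List (Int × Char) :=
        (PySem.List.pyRange 0 size).foldl (fun il s =>
          if PySem.List.pyGetD ban.toList s ' ' != '*'
            then il ++ [(s, PySem.List.pyGetD ban.toList s ' ')] else il) []
      let check : List String :=
        (user_id.foldl (fun users user => users.insert user (PySem.Str.len user))
            (PySem.Dict.empty : PySem.Dict String Int)).keys.foldl (fun check key =>
          let target := (user_id.foldl (fun users user => users.insert user (PySem.Str.len user))
            (PySem.Dict.empty : PySem.Dict String Int)).getD key 0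
          if target == size then
            let count : Int := index_list.foldl (fun count index =>
              if PySem.List.pyGetD key.toList index.1 ' ' == index.2 then count + 1 else count) 0
            if count == (index_list.length : Int) then check ++ [key] else check
          else check) []
      record ++ [check]) [] =
    banned_id.map (fun ban =>
      (PySem.List.dedup user_id).filter (fun u => solutionAltMatches ban u)) := by
  refine (PySem.List.foldl_append_singleton_eq_map _ banned_id []).trans ?_
  rw [List.nil_append]
  apply List.map_congr_left
  intro ban _
  dsimp only
  rw [usersA_keys, ← PySem.List.dedup_eq_ofList]
  refine (PySem.List.foldl_congr_mem _ _
    (fun check key => if solutionAltMatches ban key = true then check ++ [key] else check) [] ?_).trans ?_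
  · intro acc key hkey
    have hk : key ∈ user_id := (PySem.List.mem_dedup _ _).1 hkey
    have htar : (user_id.foldl (fun users user => users.insert user (PySem.Str.len user))
        (PySem.Dict.empty : PySem.Dict String Int)).getD key 0 = PySem.Str.len key := by
      rw [usersA_getD]
      simp [hk]
    dsimp only
    rw [htar]
    by_cases hlen : PySem.Str.len key = PySem.Str.len ban
    · have hbeq : (PySem.Str.len key == PySem.Str.len ban) = true := beq_iff_eq.mpr hlen
      rw [hbeq]
      simp only [if_true]
      have hcnt : ((PySem.List.pyRange 0 (PySem.Str.len ban)).foldl (fun il s =>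
            if PySem.List.pyGetD ban.toList s ' ' != '*'
              then il ++ [(s, PySem.List.pyGetD ban.toList s ' ')] else il) []).foldl
          (fun count index =>
            if PySem.List.pyGetD key.toList index.1 ' ' == index.2 then count + 1 else count) (0 : Int) =
          0 + (((PySem.List.pyRange 0 (PySem.Str.len ban)).foldl (fun il s =>
            if PySem.List.pyGetD ban.toList s ' ' != '*'
              then il ++ [(s, PySem.List.pyGetD ban.toList s ' ')] else il) []).countP
          (fun index => PySem.List.pyGetD key.toList index.1 ' ' == index.2) : Int) :=
        PySem.List.foldl_count_if _ _ _
      rw [hcnt]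
      have hbool := (Bool.eq_iff_iff).2 (check_pred_eq ban key hlen)
      rw [hbool]
      have hlen' : key.length = ban.length := by
        rw [PySem.Str.len_eq, PySem.Str.len_eq] at hlen
        have : key.toList.length = ban.toList.length := by exact_mod_cast hlen
        simpa using this
      simp [solutionAltMatches, hlen']
    · have hbeq : (PySem.Str.len key == PySem.Str.len ban) = false := beq_eq_false_iff_ne.mpr hlen
      rw [hbeq]
      have hlen' : ¬ key.length = ban.length := by
        intro h
        apply hlen
        rw [PySem.Str.len_eq, PySem.Str.len_eq]
        have : key.toList.length = ban.toList.length := by simpa using h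
        exact_mod_cast this
      simp [solutionAltMatches, hlen']
  · refine (PySem.List.foldl_append_if (fun u => solutionAltMatches ban u) id _ []).trans ?_
    simp

-- ===== VERDICT (by name: the statement is the Claim_ definition above) =====
theorem solution_spec : Claim_equal_solution := by
  intro user_id banned_id _
  unfold Spec_solution
  simp only [solution, solution_alt]
  rw [record_eq]
  set record := banned_id.map (fun ban =>
    (PySem.List.dedup user_id).filter (fun u => solutionAltMatches ban u)) with hrec
  set combos := record.foldl
    (fun cs cand => cs.flatMap (fun c => cand.map (fun x => c ++ [x]))) [[]] with hcombos
  obtain ⟨hA_nd, hA_mem⟩ := recA_char record PySem.Set.empty PySem.Set.empty (by simp [PySem.Set.empty]) (by simp [PySem.Set.empty])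
  obtain ⟨hB_nd, hB_mem⟩ := resultB_char combos PySem.Set.empty (by simp [PySem.Set.empty])
  have hmemeq : ∀ x, x ∈ solutionRec record PySem.Set.empty PySem.Set.empty ↔
      x ∈ combos.foldl (fun result c =>
        if PySem.Set.len (PySem.Set.ofList c) == (c.length : Int) then
          PySem.Set.add result (PySem.Str.join "" (PySem.List.sorted c (fun x => x)))
        else result) PySem.Set.empty := by
    intro x
    rw [hA_mem, hB_mem]
    have hempty : (PySem.Set.empty : PySem.Set String) = [] := rfl
    simp only [hempty, List.not_mem_nil, false_or, List.nil_append]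
    constructor
    · rintro ⟨c, hsel, hnd, hx⟩
      exact ⟨c, (mem_prod_foldl record [[]] c).2 ⟨[], by simp, c, hsel, by simp⟩, hnd, by simpa [keyOf] using hx⟩
    · rintro ⟨c, hc, hnd, hx⟩
      obtain ⟨c0, hc0, c1, hsel, hcc⟩ := (mem_prod_foldl record [[]] c).1 hc
      simp only [List.mem_singleton] at hc0
      subst hc0
      simp only [List.nil_append] at hcc
      cases hcc
      exact ⟨c, hsel, hnd, by simpa [keyOf] using hx⟩
  have hperm := (List.perm_ext_iff_of_nodup hA_nd hB_nd).2 hmemeq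
  exact congrArg (fun n : Nat => (n : Int)) hperm.length_eq
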